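-- pv_equiv track=rewrite | github.com/Ryanshuai/undistort_experiment | find_distort_parameter_01.py | scan_one_column
-- ===== SOURCE A (Python) =====
-- def scan_one_column(col):
--     length = 0
--     start = 0
--     end = len(col)
--     for idx, (upper, lower) in enumerate(zip(col[:-1], col[1:])):
--         if upper == 0 and lower == 255:
--             start = idx
--         if upper == 255 and lower == 0:
--             end = idx
--         if upper == 255:
--             length += 1
--
--     return start, end, length
-- ===== SOURCE B (Python) =====
-- def scan_one_column(col):
--     length = col[:-1].count(255)
--     n = len(col)
--     start = 0
--     for i in range(n - 2, -1, -1):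
--         if col[i] == 0 and col[i + 1] == 255:
--             start = i
--             break
--     end = n
--     for i in range(n - 2, -1, -1):
--         if col[i] == 255 and col[i + 1] == 0:
--             end = i
--             break
--     return start, end, length
-- ===== Notes on version B (the rewrite author's own statement) =====
-- stated objective: alternative
-- what changed: Replaces the single forward loop that accumulates start/end/length together with three independent passes: a count of 255s over col[:-1], and two backward early-terminating scans that find the last 0->255 transition (start) and the last 255->0 transition (end).
import Mathlib
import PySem

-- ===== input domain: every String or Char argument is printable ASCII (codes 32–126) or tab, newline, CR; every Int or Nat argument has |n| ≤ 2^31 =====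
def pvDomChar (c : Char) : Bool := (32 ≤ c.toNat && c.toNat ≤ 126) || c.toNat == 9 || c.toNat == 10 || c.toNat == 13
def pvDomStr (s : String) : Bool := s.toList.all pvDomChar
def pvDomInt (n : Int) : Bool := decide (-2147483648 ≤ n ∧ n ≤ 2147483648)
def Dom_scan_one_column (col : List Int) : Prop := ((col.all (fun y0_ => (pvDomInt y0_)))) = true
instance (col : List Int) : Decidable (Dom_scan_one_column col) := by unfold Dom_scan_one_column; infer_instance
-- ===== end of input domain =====

-- B replaces A's single forward triple-accumulating loop by a count plus two
-- backward early-terminating transition searches (objective: alternative decomposition).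

-- ===== PORT A =====
-- the body of A's for-loop (one step updating (start, end, length))
def stepA (st : Int × Int × Int) (p : Int × (Int × Int)) : Int × Int × Int :=
  let start := if p.2.1 == 0 && p.2.2 == 255 then p.1 else st.1
  let e := if p.2.1 == 255 && p.2.2 == 0 then p.1 else st.2.1
  let len := if p.2.1 == 255 then st.2.2 + 1 else st.2.2
  (start, e, len)

def scan_one_column (col : List Int) : Int × Int × Int :=
  (PySem.List.enumerate (List.zip col.dropLast (col.drop 1))).foldl stepA
    (0, (col.length : Int), 0)

-- ===== PORT B =====
-- backward scan with break: first indexed pair (from the back) whose values satisfy p, else default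
def findBack (p : Int → Int → Bool) : List (Int × (Int × Int)) → Int → Int
  | [], d => d
  | (i, (u, l)) :: rest, d => if p u l then i else findBack p rest d

def scan_one_column_alt (col : List Int) : Int × Int × Int :=
  let len : Int := (List.count 255 col.dropLast : Int)
  let rev := (PySem.List.enumerate (List.zip col.dropLast (col.drop 1))).reverse
  let start := findBack (fun u l => u == 0 && l == 255) rev 0
  let e := findBack (fun u l => u == 255 && l == 0) rev (col.length : Int)
  (start, e, len)

-- ===== PRECONDITION & SPEC =====
def Spec_scan_one_column (col : List Int) (out : Int × Int × Int) : Prop := out = scan_one_column_alt col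
instance (col : List Int) (out : Int × Int × Int) : Decidable (Spec_scan_one_column col out) := by unfold Spec_scan_one_column; infer_instance

-- ===== CLAIM (what is proved, stated in full; the proofs are below) =====
def Claim_equal_scan_one_column : Prop := ∀ (col : List Int), Dom_scan_one_column col → Spec_scan_one_column col (scan_one_column col)

-- ===== LEMMAS AND PROOFS =====
lemma foldl_stepA (ps : List (Int × (Int × Int))) (s0 e0 l0 : Int) :
    ps.foldl stepA (s0, e0, l0) =
      (findBack (fun u l => u == 0 && l == 255) ps.reverse s0,
       findBack (fun u l => u == 255 && l == 0) ps.reverse e0,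
       l0 + (ps.countP (fun p => p.2.1 == 255) : Int)) := by
  induction ps using List.reverseRecOn with
  | nil => simp [findBack]
  | append_singleton ps x ih =>
      obtain ⟨i, u, l⟩ := x
      simp only [List.foldl_append, List.foldl_cons, List.foldl_nil, ih,
        List.reverse_append, List.reverse_cons, List.reverse_nil, List.nil_append,
        List.cons_append, List.countP_append, stepA, findBack]
      simp only [List.countP_cons, List.countP_nil]
      split_ifs <;> simp_all <;> ring

lemma countP_fst_zip (a b : List Int) (h : a.length ≤ b.length) :
    (List.zip a b).countP (fun p => p.1 == (255 : Int)) = a.count 255 := by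
  have : (List.zip a b).countP (fun p => p.1 == (255 : Int))
      = ((List.zip a b).map Prod.fst).countP (fun x => x == (255 : Int)) := by
    rw [List.countP_map]; rfl
  rw [this, List.map_fst_zip h, List.count_eq_countP]

-- ===== VERDICT (by name: the statement is the Claim_ definition above) =====
theorem scan_one_column_spec : Claim_equal_scan_one_column := by
  intro col _
  show scan_one_column col = scan_one_column_alt col
  unfold scan_one_column scan_one_column_alt
  rw [foldl_stepA]
  refine congrArg _ (congrArg _ ?_)
  have hlen : col.dropLast.length ≤ (col.drop 1).length := by
    simp
  have h1 : (PySem.List.enumerate (List.zip col.dropLast (col.drop 1))).countP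
      (fun p => p.2.1 == (255 : Int)) = col.dropLast.count 255 := by
    rw [show (fun p : Int × (Int × Int) => p.2.1 == (255 : Int))
        = ((fun q : Int × Int => q.1 == (255 : Int)) ∘ Prod.snd) from rfl,
      ← List.countP_map, PySem.List.map_snd_enumerate]
    exact countP_fst_zip _ _ hlen
  rw [List.drop_one] at h1
  simp [h1]
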